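-- pv_equiv track=rewrite | github.com/g2vssw/Algorithm | 프로그래머스/1/92334. 신고 결과 받기/신고 결과 받기.py | solution
-- ===== SOURCE A (Python) =====
-- def solution(id_list, report, k):
--     answer = []
--     report_dict = {}
--     count_dict = {}
--     for id in id_list:
--         report_dict[id] = set()
--         count_dict[id] = 0
--     for re in report:
--         reporter, reported = re.split()
--         report_dict[reporter].add(reported)
--     for id in id_list:
--         for people in report_dict[id]:
--             count_dict[people] += 1
--     for id in id_list:
--         cnt = 0
--         for id_re in report_dict[id]:
--             if count_dict[id_re] >= k:
--                 cnt += 1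
--         answer.append(cnt)
--         cnt = 0
--
--     return answer
-- ===== SOURCE B (Python) =====
-- def solution(id_list, report, k):
--     reported_by = {}
--     for r in report:
--         reporter, reported = r.split()
--         reported_by.setdefault(reported, set()).add(reporter)
--     result = {i: 0 for i in id_list}
--     for reported, reporters in reported_by.items():
--         if len(reporters) >= k:
--             for rep in reporters:
--                 result[rep] += 1
--     return [result[i] for i in id_list]
-- ===== Notes on version B (the rewrite author's own statement) =====
-- stated objective: alternative
-- what changed: B builds an inverted index reported->set of distinct reporters in one pass over report, bans users with >= k reporters and distributes increments from each banned user to its reporters, instead of A's per-reporter sets plus a separate count dict scanned per id.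
-- outside the precondition, e.g. on solution(['a', 'b', 'b'], ['b a'], 2): A returns [0, 1, 1], B returns [0, 0, 0]
import Mathlib
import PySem

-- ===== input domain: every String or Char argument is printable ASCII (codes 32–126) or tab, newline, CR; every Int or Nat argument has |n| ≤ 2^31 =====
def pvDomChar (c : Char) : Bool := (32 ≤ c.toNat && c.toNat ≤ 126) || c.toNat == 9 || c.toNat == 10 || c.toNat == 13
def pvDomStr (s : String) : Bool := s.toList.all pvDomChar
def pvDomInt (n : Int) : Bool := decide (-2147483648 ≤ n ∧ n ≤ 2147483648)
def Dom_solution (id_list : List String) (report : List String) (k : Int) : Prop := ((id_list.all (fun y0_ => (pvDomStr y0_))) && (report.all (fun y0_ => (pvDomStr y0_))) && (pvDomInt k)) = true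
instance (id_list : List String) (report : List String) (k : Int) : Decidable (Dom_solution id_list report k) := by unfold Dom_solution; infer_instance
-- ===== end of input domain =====

-- B replaces A's per-reporter sets + count dict with an inverted index (reported user -> set of
-- distinct reporters) and distributes increments from each banned user to its reporters (alternative
-- decomposition, same asymptotic cost).


-- ===== PORT A =====
-- 'reporter, reported = re.split()': some pair iff split() yields exactly two words
-- (otherwise Python raises ValueError; such inputs are excluded by Pre_solution).
def split2? (r : String) : Option (String × String) :=
  match PySem.Str.split₀ r with
  | [a, b] => some (a, b)
  | _ => none

def solution (id_list : List String) (report : List String) (k : Int) : List Int :=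
  -- first loop: report_dict[id] = set(); count_dict[id] = 0
  let init := id_list.foldl
    (fun (p : PySem.Dict String (PySem.Set String) × PySem.Dict String Int) id =>
      (p.1.insert id PySem.Set.empty, p.2.insert id 0))
    (PySem.Dict.empty, PySem.Dict.empty)
  -- second loop: report_dict[reporter].add(reported)  (KeyError outside Pre_: skipped)
  let rd := report.foldl
    (fun d re =>
      match split2? re with
      | some (reporter, reported) =>
          d.modify reporter PySem.Set.empty (fun s => s.add reported)
      | none => d)
    init.1
  -- third loop: count_dict[people] += 1  (KeyError outside Pre_: treated as fresh 0)
  let cd := id_list.foldl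
    (fun d id =>
      (rd.getD id PySem.Set.empty).foldl (fun d2 people => d2.modify people 0 (· + 1)) d)
    init.2
  -- fourth loop: count the reported users of id whose count reached k, append
  id_list.foldl
    (fun answer id =>
      answer ++ [(rd.getD id PySem.Set.empty).foldl
        (fun cnt id_re => if cd.getD id_re 0 ≥ k then cnt + 1 else cnt) 0])
    []

-- ===== PORT B =====
def solution_alt (id_list : List String) (report : List String) (k : Int) : List Int :=
  -- reported_by.setdefault(reported, set()).add(reporter)
  let reported_by := report.foldl
    (fun (d : PySem.Dict String (PySem.Set String)) r =>
      match split2? r with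
      | some (reporter, reported) =>
          d.insert reported ((d.getD reported PySem.Set.empty).add reporter)
      | none => d)
    PySem.Dict.empty
  -- result = {i: 0 for i in id_list}
  let result0 := id_list.foldl
    (fun (d : PySem.Dict String Int) i => d.insert i 0) PySem.Dict.empty
  -- for reported, reporters in reported_by.items(): if len(reporters) >= k: bump each reporter
  let result := reported_by.items.foldl
    (fun d p =>
      if PySem.Set.len p.2 ≥ k then
        p.2.foldl (fun d2 rep => d2.modify rep 0 (· + 1)) d
      else d)
    result0
  -- [result[i] for i in id_list]
  id_list.map (fun i => result.getD i 0)

-- ===== PRECONDITION & SPEC =====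
-- every report line must split into exactly two words, both registered ids (else A raises
-- ValueError/KeyError); Pre_ also excludes id_lists in which a duplicated id occurs as a
-- reporter: A's loops over id_list then count that id's reports once per duplicate — a
-- duplicate-keys corner no caller would specify (the problem guarantees distinct ids).
def okReport (id_list : List String) (r : String) : Bool :=
  match split2? r with
  | some (a, b) => decide (a ∈ id_list) && decide (b ∈ id_list)
  | none => false

-- does report line r name id as its reporter?
def isReporterOf (r : String) (id : String) : Bool :=
  match split2? r with
  | some (a, _) => a == id
  | none => false

def Pre_solution (id_list : List String) (report : List String) (k : Int) : Prop :=
  report.all (okReport id_list) = true ∧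
  (id_list.filter (fun id => report.any (fun r => isReporterOf r id))).Nodup
instance (id_list : List String) (report : List String) (k : Int) : Decidable (Pre_solution id_list report k) := by unfold Pre_solution; infer_instance

def pvWitness_solution : List String × List String × Int := (["muzi", "frodo"], ["muzi frodo", "frodo muzi"], 1)

def Spec_solution (id_list : List String) (report : List String) (k : Int) (out : List Int) : Prop := out = solution_alt id_list report k
instance (id_list : List String) (report : List String) (k : Int) (out : List Int) : Decidable (Spec_solution id_list report k out) := by unfold Spec_solution; infer_instance

-- ===== CLAIM (what is proved, stated in full; the proofs are below) =====
def Claim_equal_solution : Prop := ∀ (id_list : List String) (report : List String) (k : Int), Dom_solution id_list report k → Pre_solution id_list report k → Spec_solution id_list report k (solution id_list report k)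

-- ===== LEMMAS AND PROOFS =====

-- the list of (reporter, reported) pairs both programs process
def pvPairs (report : List String) : List (String × String) := report.filterMap split2?

-- users id reported (with duplicates), users who reported y (with duplicates)
def pvRepBy (P : List (String × String)) (id : String) : List String :=
  (P.filter (fun p => p.1 == id)).map (·.2)
def pvRepOf (P : List (String × String)) (y : String) : List String :=
  (P.filter (fun p => p.2 == y)).map (·.1)

lemma mem_repBy {P : List (String × String)} {id y : String} :
    y ∈ pvRepBy P id ↔ (id, y) ∈ P := by
  simp only [pvRepBy, List.mem_map, List.mem_filter, beq_iff_eq]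
  constructor
  · rintro ⟨⟨a, b⟩, ⟨hm, rfl⟩, rfl⟩; exact hm
  · intro h; exact ⟨(id, y), ⟨h, rfl⟩, rfl⟩

lemma mem_repOf {P : List (String × String)} {x y : String} :
    x ∈ pvRepOf P y ↔ (x, y) ∈ P := by
  simp only [pvRepOf, List.mem_map, List.mem_filter, beq_iff_eq]
  constructor
  · rintro ⟨⟨a, b⟩, ⟨hm, rfl⟩, rfl⟩; exact hm
  · intro h; exact ⟨(x, y), ⟨h, rfl⟩, rfl⟩

-- a fold inserting a constant value leaves getD at that value
lemma getD_foldl_insert_const (l : List String) {ν : Type} (v : ν)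
    (d : PySem.Dict String ν) (y : String) (h : d.getD y v = v) :
    (l.foldl (fun d x => d.insert x v) d).getD y v = v := by
  induction l generalizing d with
  | nil => exact h
  | cons a t ih =>
    simp only [List.foldl_cons]
    exact ih _ (by rw [PySem.Dict.getD_insert]; split <;> simp [h])

-- A's second loop: what report_dict holds at x
lemma rd_getD (P : List (String × String)) (d : PySem.Dict String (PySem.Set String)) (x : String) :
    (P.foldl (fun d p => d.modify p.1 PySem.Set.empty (fun s => s.add p.2)) d).getD x PySem.Set.empty
      = (pvRepBy P x).foldl PySem.Set.add (d.getD x PySem.Set.empty) := by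
  induction P generalizing d with
  | nil => rfl
  | cons p t ih =>
    simp only [List.foldl_cons, ih, pvRepBy, List.filter_cons]
    rw [PySem.Dict.getD_modify]
    by_cases hx : x = p.1
    · simp [hx]
    · have hb : (p.1 == x) = false := beq_eq_false_iff_ne.mpr (fun h => hx h.symm)
      simp [if_neg hx, hb]

-- A's third loop: what count_dict holds at y
lemma cd_getD (S : String → PySem.Set String) (ids : List String)
    (d : PySem.Dict String Int) (y : String) :
    (ids.foldl (fun d id => (S id).foldl (fun d2 p => d2.modify p 0 (· + 1)) d) d).getD y 0
      = d.getD y 0 + ((ids.map (fun id => ((S id).count y : Int))).sum) := by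
  induction ids generalizing d with
  | nil => simp
  | cons a t ih =>
    simp only [List.foldl_cons, List.map_cons, List.sum_cons, ih,
      PySem.Dict.getD_foldl_modify_add_one]
    ring

-- B's banning loop: what result holds at id
lemma res_getD (k : Int) (L : List (String × PySem.Set String))
    (d : PySem.Dict String Int) (id : String) :
    (L.foldl (fun d p =>
        if PySem.Set.len p.2 ≥ k then
          p.2.foldl (fun d2 rep => d2.modify rep 0 (· + 1)) d
        else d) d).getD id 0
      = d.getD id 0 +
        ((L.map (fun p => if PySem.Set.len p.2 ≥ k then (p.2.count id : Int) else 0)).sum) := by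
  induction L generalizing d with
  | nil => simp
  | cons a t ih =>
    simp only [List.foldl_cons, List.map_cons, List.sum_cons]
    by_cases h : PySem.Set.len a.2 ≥ k
    · simp only [if_pos h, ih, PySem.Dict.getD_foldl_modify_add_one]; ring
    · simp only [if_neg h, ih]; ring

-- B's inverted index: what reported_by holds at y
lemma rb_getD (P : List (String × String)) (d : PySem.Dict String (PySem.Set String)) (y : String) :
    (P.foldl (fun d p => d.insert p.2 ((d.getD p.2 PySem.Set.empty).add p.1)) d).getD y PySem.Set.empty
      = (pvRepOf P y).foldl PySem.Set.add (d.getD y PySem.Set.empty) := by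
  induction P generalizing d with
  | nil => rfl
  | cons p t ih =>
    simp only [List.foldl_cons, ih, pvRepOf, List.filter_cons]
    rw [PySem.Dict.getD_insert]
    by_cases hy : y = p.2
    · simp [hy]
    · have hb : (p.2 == y) = false := beq_eq_false_iff_ne.mpr (fun h => hy h.symm)
      simp [if_neg hy, hb]

-- count in a nodup list is a membership indicator
lemma count_nodup (l : List String) (h : l.Nodup) (y : String) :
    (l.count y : Int) = if y ∈ l then 1 else 0 := by
  split
  · next hm => simp [List.count_eq_one_of_mem h hm]
  · next hm => simp [List.count_eq_zero.mpr hm]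

-- number of ids who reported y = size of the distinct-reporter set of y
lemma numRep_eq (P : List (String × String)) (ids : List String) (f : String → Bool)
    (hnd : (ids.filter f).Nodup) (y : String) (himp : ∀ x, (x, y) ∈ P → f x = true)
    (hsub : ∀ p ∈ P, p.1 ∈ ids) :
    ids.countP (fun id => decide ((id, y) ∈ P)) = (PySem.Set.ofList (pvRepOf P y)).length := by
  rw [List.countP_eq_length_filter]
  refine List.Perm.length_eq ?_
  have hnd' : (ids.filter (fun id => decide ((id, y) ∈ P))).Nodup :=
    List.Sublist.nodup
      (List.monotone_filter_right ids (fun a ha => himp a (of_decide_eq_true ha))) hnd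
  rw [List.perm_ext_iff_of_nodup hnd' (PySem.Set.nodup_ofList _)]
  intro x
  simp only [List.mem_filter, decide_eq_true_eq, PySem.Set.mem_ofList, mem_repOf]
  exact ⟨fun h => h.2, fun h => ⟨hsub _ h, h⟩⟩

-- counting over a superset with a membership guard
lemma countP_superset (l s : List String) (hl : l.Nodup) (hs : s.Nodup)
    (hsub : ∀ y ∈ s, y ∈ l) (q : String → Bool) :
    l.countP (fun y => q y && decide (y ∈ s)) = s.countP q := by
  have h1 : l.countP (fun y => q y && decide (y ∈ s)) = (l.filter (fun y => decide (y ∈ s))).countP q := by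
    rw [List.countP_filter]
  rw [h1]
  refine List.Perm.countP_eq q ?_
  rw [List.perm_ext_iff_of_nodup (hl.filter _) hs]
  intro x
  simp only [List.mem_filter, decide_eq_true_eq]
  exact ⟨fun h => h.2, fun h => ⟨hsub _ h, h⟩⟩

-- ===== VERDICT (by name: the statement is the Claim_ definition above) =====
theorem solution_spec : Claim_equal_solution := by
  intro id_list report k _ hpre
  obtain ⟨hall, hndR⟩ := hpre
  have hrep : ∀ x y, (x, y) ∈ pvPairs report → (report.any (fun r => isReporterOf r x)) = true := by
    intro x y hm
    obtain ⟨r, hr, hs⟩ := List.mem_filterMap.mp hm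
    exact List.any_eq_true.mpr ⟨r, hr, by unfold isReporterOf; rw [hs]; simp⟩
  have hP : ∀ p ∈ pvPairs report, p.1 ∈ id_list ∧ p.2 ∈ id_list := by
    intro p hp
    obtain ⟨a, b⟩ := p
    obtain ⟨r, hr, hs⟩ := List.mem_filterMap.mp hp
    have h2 := List.all_eq_true.mp hall r hr
    unfold okReport at h2
    rw [hs] at h2
    simpa using h2
  simp only [Spec_solution, solution, solution_alt]
  have hinit : (id_list.foldl (fun (p : PySem.Dict String (PySem.Set String) × PySem.Dict String Int) id => (p.1.insert id PySem.Set.empty, p.2.insert id 0)) (PySem.Dict.empty, PySem.Dict.empty))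
      = (id_list.foldl (fun d id => d.insert id PySem.Set.empty) PySem.Dict.empty,
         id_list.foldl (fun d id => d.insert id (0:Int)) PySem.Dict.empty) :=
    PySem.List.foldl_prod_mk (fun d id => d.insert id PySem.Set.empty) (fun d id => d.insert id (0:Int)) id_list PySem.Dict.empty PySem.Dict.empty
  rw [hinit]
  have hA2 : ∀ (d : PySem.Dict String (PySem.Set String)),
      report.foldl (fun d re => match split2? re with
        | some (reporter, reported) => d.modify reporter PySem.Set.empty fun s => s.add reported
        | none => d) d
      = (pvPairs report).foldl (fun d q => d.modify q.1 PySem.Set.empty fun s => s.add q.2) d := by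
    intro d
    rw [pvPairs, List.foldl_filterMap]
    apply PySem.List.foldl_congr_mem
    intro acc x _
    cases h : split2? x with
    | none => simp
    | some q => cases q; simp
  have hB2 : ∀ (d : PySem.Dict String (PySem.Set String)),
      report.foldl (fun d r => match split2? r with
        | some (reporter, reported) => d.insert reported ((d.getD reported PySem.Set.empty).add reporter)
        | none => d) d
      = (pvPairs report).foldl (fun d q => d.insert q.2 ((d.getD q.2 PySem.Set.empty).add q.1)) d := by
    intro d
    rw [pvPairs, List.foldl_filterMap]
    apply PySem.List.foldl_congr_mem
    intro acc x _
    cases h : split2? x with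
    | none => simp
    | some q => cases q; simp
  rw [hA2, hB2]
  simp only []
  set P := pvPairs report with hPd
  -- report_dict / reported_by / count_dict lookups in closed form
  have hrd : ∀ x, ((P.foldl (fun d q => d.modify q.1 PySem.Set.empty fun s => s.add q.2)
      (id_list.foldl (fun d id => d.insert id PySem.Set.empty) PySem.Dict.empty)).getD x PySem.Set.empty)
      = PySem.Set.ofList (pvRepBy P x) := by
    intro x
    rw [rd_getD, getD_foldl_insert_const _ _ _ _ (by simp [pysem]), PySem.Set.ofList_eq_foldl]
    rfl
  have hrb : ∀ y, ((P.foldl (fun d q => d.insert q.2 ((d.getD q.2 PySem.Set.empty).add q.1))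
      PySem.Dict.empty).getD y PySem.Set.empty) = PySem.Set.ofList (pvRepOf P y) := by
    intro y
    rw [rb_getD, PySem.Set.ofList_eq_foldl]
    simp [pysem]
  have hcd : ∀ y, ((id_list.foldl (fun d id =>
        ((P.foldl (fun d q => d.modify q.1 PySem.Set.empty fun s => s.add q.2)
          (id_list.foldl (fun d id => d.insert id PySem.Set.empty) PySem.Dict.empty)).getD id PySem.Set.empty).foldl
          (fun d2 people => d2.modify people 0 fun x => x + 1) d)
        (id_list.foldl (fun d id => d.insert id 0) PySem.Dict.empty)).getD y 0)
      = (id_list.countP (fun id => decide ((id, y) ∈ P)) : Int) := by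
    intro y
    rw [cd_getD]
    rw [getD_foldl_insert_const _ _ _ _ (by simp [pysem])]
    rw [List.map_congr_left (fun id _ => by rw [hrd id])]
    have : ∀ id ∈ id_list, ((PySem.Set.ofList (pvRepBy P id)).count y : Int)
        = if decide ((id, y) ∈ P) = true then 1 else 0 := by
      intro id _
      rw [count_nodup _ (PySem.Set.nodup_ofList _) y]
      simp [PySem.Set.mem_ofList, mem_repBy]
    rw [List.map_congr_left this, PySem.List.sum_map_ite_one_zero]
    simp
  have hsub1 : ∀ p ∈ P, p.1 ∈ id_list := fun p hp => (hP p hp).1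
  have hnodupK : (P.foldl (fun d q => d.insert q.2 ((d.getD q.2 PySem.Set.empty).add q.1)) PySem.Dict.empty).keys.Nodup :=
    PySem.Dict.nodup_keys_foldl_insert_key P (fun q => q.2) _ _ (by simp [pysem])
  have hkeys : (P.foldl (fun d q => d.insert q.2 ((d.getD q.2 PySem.Set.empty).add q.1)) PySem.Dict.empty).keys
      = PySem.Set.ofList (P.map (fun q => q.2)) := by
    rw [PySem.Dict.keys_foldl_insert_key P (fun q => q.2)]
    simp [pysem, PySem.Set.update, PySem.Set.ofList_eq_foldl]
  have hitems : (P.foldl (fun d q => d.insert q.2 ((d.getD q.2 PySem.Set.empty).add q.1)) PySem.Dict.empty).items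
      = (PySem.Set.ofList (P.map (fun q => q.2))).map (fun y => (y, PySem.Set.ofList (pvRepOf P y))) := by
    rw [PySem.Dict.items_eq_map_keys _ hnodupK PySem.Set.empty, hkeys]
    exact List.map_congr_left (fun y _ => by rw [hrb y])
  rw [PySem.List.foldl_append_singleton_eq_map, List.nil_append, hitems]
  apply List.map_congr_left
  intro id hid
  rw [hrd id, PySem.List.foldl_ite_add_one, res_getD k]
  rw [getD_foldl_insert_const _ _ _ _ (by simp [pysem])]
  rw [List.map_map]
  have hsub : ∀ y ∈ PySem.Set.ofList (pvRepBy P id), y ∈ PySem.Set.ofList (P.map (fun q => q.2)) := by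
    intro y hy
    rw [PySem.Set.mem_ofList] at hy ⊢
    exact List.mem_map.mpr ⟨(id, y), mem_repBy.mp hy, rfl⟩
  have hterm : ∀ y ∈ PySem.Set.ofList (P.map (fun q => q.2)),
      ((fun p => if PySem.Set.len p.2 ≥ k then ((p.2.count id : Nat) : Int) else 0) ∘ fun y => (y, PySem.Set.ofList (pvRepOf P y))) y
      = if (decide (((PySem.Set.ofList (pvRepOf P y)).length : Int) ≥ k) && decide (y ∈ PySem.Set.ofList (pvRepBy P id))) = true then 1 else 0 := by
    intro y _
    simp only [Function.comp]
    rw [count_nodup _ (PySem.Set.nodup_ofList _) id]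
    have hm : (id ∈ PySem.Set.ofList (pvRepOf P y)) ↔ (y ∈ PySem.Set.ofList (pvRepBy P id)) := by
      rw [PySem.Set.mem_ofList, PySem.Set.mem_ofList, mem_repOf, mem_repBy]
    have hl : PySem.Set.len (PySem.Set.ofList (pvRepOf P y)) = ((PySem.Set.ofList (pvRepOf P y)).length : Int) := by
      simp [PySem.Set.len]
    rw [hl]
    by_cases h1 : ((PySem.Set.ofList (pvRepOf P y)).length : Int) ≥ k <;>
      by_cases h2 : y ∈ PySem.Set.ofList (pvRepBy P id) <;>
      simp [h1, h2, hm]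
  rw [List.map_congr_left hterm, PySem.List.sum_map_ite_one_zero]
  rw [countP_superset _ _ (PySem.Set.nodup_ofList _) (PySem.Set.nodup_ofList _) hsub]
  have hpred : ∀ x ∈ PySem.Set.ofList (pvRepBy P id),
      decide (((id_list.foldl (fun d id =>
          ((P.foldl (fun d q => d.modify q.1 PySem.Set.empty fun s => s.add q.2)
            (id_list.foldl (fun d id => d.insert id PySem.Set.empty) PySem.Dict.empty)).getD id PySem.Set.empty).foldl
            (fun d2 people => d2.modify people 0 fun x => x + 1) d)
          (id_list.foldl (fun d id => d.insert id 0) PySem.Dict.empty)).getD x 0) ≥ k) = true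
      ↔ decide (((PySem.Set.ofList (pvRepOf P x)).length : Int) ≥ k) = true := by
    intro x _
    rw [hcd x, numRep_eq P id_list _ hndR x (fun a ha => hrep a x ha) hsub1]
  rw [List.countP_congr hpred]
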